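-- pv_equiv track=rewrite | github.com/Nikkuniku/AtcoderProgramming | Other/Typical DP Contest/M.py | bitDP
-- ===== SOURCE A (Python) =====
-- def bitDP(N, S, P):
--     dist = [[0] * N for _ in range(1 << N)]
--     for v in range(N):
--         if v == S:
--             dist[1 << v][v] = 1
--         if P[v]:
--             dist[1 << v][v] = P[S]
--     for s in range(1 << N):
--         for u in range(N):
--             if not s & (1 << u):
--                 continue
--             for v in range(N):
--                 if s & (1 << v):
--                     continue
--                 dist[s | (1 << v)][v] += dist[s][u]
--                 dist[s | (1 << v)][v] %= MOD
--     res = []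
--     for v in range(N):
--         temp = 0
--         for s in range(1 << N):
--             temp += dist[s][v]
--         res.append(temp)
--     return res
--
-- MOD = 1000000007
-- ===== SOURCE B (Python) =====
-- def bitDP(N, S, P):
--     MOD = 1000000007
--     full = 1 << N
--     init = [0] * N
--     for v in range(N):
--         if v == S:
--             init[v] = 1
--         if P[v]:
--             init[v] = P[S]
--     # g[s] = total (over end vertices) weighted count of orderings of the subset s,
--     # pulled from the one-smaller subsets; one scalar per subset instead of a row per subset.
--     g = [0] * full
--     for s in range(1, full):
--         if s & (s - 1) == 0:
--             g[s] = init[s.bit_length() - 1]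
--         else:
--             tot = 0
--             for u in range(N):
--                 if s >> u & 1:
--                     tot += g[s ^ (1 << u)] % MOD
--             g[s] = tot
--     # answer for v: its own start weight plus, for every nonempty subset s not containing v,
--     # the orderings of s extended by v (= g[s] reduced mod MOD).
--     res = []
--     for v in range(N):
--         acc = init[v]
--         for s in range(1, full):
--             if not s >> v & 1:
--                 acc += g[s] % MOD
--         res.append(acc)
--     return res
-- ===== Notes on version B (the rewrite author's own statement) =====
-- stated objective: alternative
-- what changed: Replaces A's 2^N x N per-(subset, end-vertex) DP table and its double inner loop by one aggregate value per subset pulled from the one-smaller subsets, reading each vertex's answer off as a sum over complement subsets (one inner loop per subset instead of two).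
import Mathlib
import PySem

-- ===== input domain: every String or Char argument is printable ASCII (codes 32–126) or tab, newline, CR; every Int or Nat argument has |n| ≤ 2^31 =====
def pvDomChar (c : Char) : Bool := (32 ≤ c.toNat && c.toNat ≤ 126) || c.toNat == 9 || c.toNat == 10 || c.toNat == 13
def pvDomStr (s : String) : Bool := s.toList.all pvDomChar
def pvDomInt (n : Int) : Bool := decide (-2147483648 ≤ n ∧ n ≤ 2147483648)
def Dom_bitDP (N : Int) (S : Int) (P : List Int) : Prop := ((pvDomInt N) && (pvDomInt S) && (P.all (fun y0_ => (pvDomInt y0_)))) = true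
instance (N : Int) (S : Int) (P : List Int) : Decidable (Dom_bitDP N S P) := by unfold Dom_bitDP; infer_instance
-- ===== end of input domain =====

-- B replaces A's per-(subset, end-vertex) table and its double inner loop by one aggregate
-- value per subset, pulled from the one-smaller subsets, reading each answer off as a
-- sum over complement subsets (one inner loop per subset instead of two).

def MODi : Int := 1000000007

-- ===== PORT A =====
-- dist[s][v] as a list of rows; get2/set2 are plain in-range list indexing/assignment
-- (all indices A uses are in range: s ||| 2^v < 2^n and v < n).
def get2 (d : List (List Int)) (s v : Nat) : Int := (d.getD s []).getD v 0

def set2 (d : List (List Int)) (s v : Nat) (x : Int) : List (List Int) :=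
  d.set s ((d.getD s []).set v x)

-- dist = [[0]*N for _ in range(1 << N)]
def aZero (n : Nat) : List (List Int) :=
  (List.range (2 ^ n)).map (fun _ => (List.range n).map (fun _ => (0 : Int)))

-- body of `for v in range(N):` (init loop); P[v]/P[S] are in range under Pre_
def aInitStep (S : Int) (P : List Int) (d : List (List Int)) (v : Nat) : List (List Int) :=
  let d1 := if (v : Int) = S then set2 d (2 ^ v) v 1 else d
  if (PySem.List.pyGet? P (v : Int)).getD 0 ≠ 0 then
    set2 d1 (2 ^ v) v ((PySem.List.pyGet? P S).getD 0)
  else d1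

-- body of `for v in range(N):` inside the main loop (the two statements on dist fused
-- into one read-add-mod-write of the same cell)
def aMainInner (d : List (List Int)) (s u v : Nat) : List (List Int) :=
  if s &&& 2 ^ v ≠ 0 then d
  else set2 d (s ||| 2 ^ v) v (PySem.Int.mod (get2 d (s ||| 2 ^ v) v + get2 d s u) MODi)

-- body of `for u in range(N):`
def aMainU (n : Nat) (d : List (List Int)) (s u : Nat) : List (List Int) :=
  if s &&& 2 ^ u = 0 then d
  else (List.range n).foldl (fun d v => aMainInner d s u v) d

-- `for s in range(1 << N): for u in range(N): …`
def aMain (n : Nat) (d : List (List Int)) : List (List Int) :=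
  (List.range (2 ^ n)).foldl (fun d s => (List.range n).foldl (fun d u => aMainU n d s u) d) d

-- result loop: res.append(sum over s of dist[s][v])
def aRes (n : Nat) (d : List (List Int)) : List Int :=
  (List.range n).foldl
    (fun res v => res ++ [(List.range (2 ^ n)).foldl (fun t s => t + get2 d s v) 0]) []

-- N.toNat = N under Pre_ (Python raises ValueError on `1 << N` for N < 0)
def bitDP (N : Int) (S : Int) (P : List Int) : List Int :=
  let n := N.toNat
  aRes n (aMain n ((List.range n).foldl (aInitStep S P) (aZero n)))

-- ===== PORT B =====
-- init = [0]*N; the same two-if loop as in Source B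
def bInit (S : Int) (P : List Int) (n : Nat) : List Int :=
  (List.range n).foldl
    (fun a (v : Nat) =>
      let a1 := if (v : Int) = S then a.set v 1 else a
      if (PySem.List.pyGet? P (v : Int)).getD 0 ≠ 0 then
        a1.set v ((PySem.List.pyGet? P S).getD 0)
      else a1)
    (List.replicate n (0 : Int))

-- g loop; `for s in range(1, full)` rendered as s = s0 + 1 over range(full - 1)
def bG (n : Nat) (ini : List Int) : List Int :=
  (List.range (2 ^ n - 1)).foldl
    (fun g s0 =>
      let s := s0 + 1
      if s &&& (s - 1) = 0 then g.set s (ini.getD s.log2 0)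
      else
        g.set s ((List.range n).foldl
          (fun tot u =>
            if (s >>> u) &&& 1 = 1 then tot + PySem.Int.mod (g.getD (s ^^^ 2 ^ u) 0) MODi
            else tot) 0))
    (List.replicate (2 ^ n) (0 : Int))

-- result loop of Source B
def bRes (n : Nat) (ini g : List Int) : List Int :=
  (List.range n).foldl
    (fun res v =>
      res ++ [(List.range (2 ^ n - 1)).foldl
        (fun acc s0 =>
          let s := s0 + 1
          if (s >>> v) &&& 1 = 0 then acc + PySem.Int.mod (g.getD s 0) MODi else acc)
        (ini.getD v 0)]) []

-- N.toNat = N under Pre_ (Source B also raises on `1 << N` for N < 0)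
def bitDP_alt (N : Int) (S : Int) (P : List Int) : List Int :=
  let n := N.toNat
  let ini := bInit S P n
  bRes n ini (bG n ini)

-- ===== PRECONDITION & SPEC =====
-- Exactly the inputs where the Python A returns: N ≥ 0 (else `1 << N` raises ValueError),
-- N ≤ len(P) (else P[v] raises IndexError), and whenever some P[v] with v < N is truthy,
-- S must be a valid (possibly negative) index into P, since P[S] is evaluated exactly then.
def Pre_bitDP (N : Int) (S : Int) (P : List Int) : Prop :=
  0 ≤ N ∧ N ≤ (P.length : Int) ∧
    ((∃ v ∈ List.range N.toNat, P.getD v 0 ≠ 0) →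
      (-(P.length : Int) ≤ S ∧ S < (P.length : Int)))

instance (N : Int) (S : Int) (P : List Int) : Decidable (Pre_bitDP N S P) := by
  unfold Pre_bitDP; infer_instance

def pvWitness_bitDP : Int × Int × List Int := (2, 0, [0, 3])

def Spec_bitDP (N : Int) (S : Int) (P : List Int) (out : List Int) : Prop := out = bitDP_alt N S P
instance (N : Int) (S : Int) (P : List Int) (out : List Int) : Decidable (Spec_bitDP N S P out) := by
  unfold Spec_bitDP; infer_instance

-- ===== CLAIM (what is proved, stated in full; the proofs are below) =====
def Claim_equal_bitDP : Prop :=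
  ∀ (N : Int) (S : Int) (P : List Int), Dom_bitDP N S P → Pre_bitDP N S P →
    Spec_bitDP N S P (bitDP N S P)

-- ===== LEMMAS AND PROOFS =====

def bitSum (s : Nat) (f : Nat → Int) : Nat → Int
  | 0 => 0
  | m + 1 => bitSum s f m + (if s.testBit m then f m else 0)

lemma bitSum_congr {s : Nat} {f g : Nat → Int} :
    ∀ m, (∀ u, u < m → s.testBit u = true → f u = g u) → bitSum s f m = bitSum s g m := by
  intro m h
  induction m with
  | zero => rfl
  | succ m ih =>
    simp only [bitSum, ih (fun u hu hb => h u (by omega) hb)]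
    rcases hb : s.testBit m with _|_ <;> simp [hb, h m (by omega)]

lemma bitSum_two_pow' {f : Nat → Int} {j : Nat} : ∀ m, bitSum (2 ^ j) f m = if j < m then f j else 0 := by
  intro m
  induction m with
  | zero => rw [bitSum, if_neg (by omega)]
  | succ m ih =>
    simp only [bitSum, ih, Nat.testBit_two_pow]
    by_cases h : j = m
    · subst h; simp
    · by_cases h2 : j < m <;> simp [h, h2] <;> omega

def mkR (n : Nat) (f : Nat → Int) : List Int := (List.range n).map f

lemma mkR_set {n v : Nat} (f : Nat → Int) (x : Int) :
    (mkR n f).set v x = mkR n (fun j => if j = v then x else f j) := by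
  apply List.ext_getElem
  · simp [mkR]
  · intro i h1 h2
    simp only [mkR, List.getElem_set, List.getElem_map, List.getElem_range]
    split
    · simp_all
    · rename_i hne; simp [Ne.symm hne]

lemma mkR_getD {n j : Nat} (f : Nat → Int) (h : j < n) : (mkR n f).getD j 0 = f j := by
  simp [mkR, List.getD_eq_getElem?_getD, h]

lemma mkR_congr {n : Nat} {f g : Nat → Int} (h : ∀ j, j < n → f j = g j) :
    mkR n f = mkR n g := by
  apply List.map_congr_left; intro a ha; exact h a (List.mem_range.mp ha)

lemma replicate_eq_mkR (n : Nat) : List.replicate n (0 : Int) = mkR n (fun _ => 0) := by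
  simp [mkR, List.map_const']

lemma xor_two_pow_lt {s v : Nat} (h : s.testBit v = true) : s ^^^ 2 ^ v < s :=
  Nat.lt_of_testBit (n := s ^^^ 2 ^ v) (m := s) v
    (by simp [Nat.testBit_xor, h]) h
    (fun j hj => by simp [Nat.testBit_xor, Nat.ne_of_lt hj])

def gA (ini : Nat → Int) (n : Nat) : Nat → Nat → Int
  | _, 0 => 0
  | 0, _ + 1 => 0
  | fuel + 1, t + 1 =>
    if (t + 1) &&& t = 0 then ini (t + 1).log2
    else bitSum (t + 1) (fun u => PySem.Int.mod (gA ini n fuel ((t + 1) ^^^ 2 ^ u)) MODi) n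

def gval (ini : Nat → Int) (n s : Nat) : Int := gA ini n s s

lemma gA_fuel {ini : Nat → Int} {n : Nat} :
    ∀ s f1 f2, s ≤ f1 → s ≤ f2 → gA ini n f1 s = gA ini n f2 s := by
  intro s
  induction s using Nat.strong_induction_on with
  | _ s ih =>
    intro f1 f2 h1 h2
    match s, f1, f2 with
    | 0, f1, f2 => cases f1 <;> cases f2 <;> rfl
    | t + 1, f1 + 1, f2 + 1 =>
      simp only [gA]
      split
      · rfl
      · apply bitSum_congr
        intro u _ hb
        have hlt : (t + 1) ^^^ 2 ^ u < t + 1 := xor_two_pow_lt hb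
        rw [ih _ hlt f1 f2 (by omega) (by omega)]

lemma gval_eq {ini : Nat → Int} {n : Nat} {s : Nat} (hs : s ≠ 0) :
    gval ini n s = if s &&& (s - 1) = 0 then ini s.log2
      else bitSum s (fun u => PySem.Int.mod (gval ini n (s ^^^ 2 ^ u)) MODi) n := by
  obtain ⟨t, rfl⟩ : ∃ t, s = t + 1 := ⟨s - 1, by omega⟩
  show gA ini n (t + 1) (t + 1) = _
  simp only [gA, Nat.add_sub_cancel]
  split
  · rfl
  · apply bitSum_congr
    intro u _ hb
    have hlt : (t + 1) ^^^ 2 ^ u < t + 1 := xor_two_pow_lt hb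
    rw [show gA ini n t ((t+1) ^^^ 2^u) = gval ini n ((t+1) ^^^ 2^u) from
      gA_fuel _ t _ (by omega) (le_refl _)]

lemma two_pow_and_self_sub_one (v : Nat) : (2 ^ v) &&& (2 ^ v - 1) = 0 :=
  (Nat.ne_zero_and_sub_one_eq_zero_iff_isPowerOfTwo.mpr ⟨v, rfl⟩).2

lemma eq_two_pow_log2 {s : Nat} (h : s ≠ 0) (h2 : s &&& (s - 1) = 0) : s = 2 ^ s.log2 := by
  obtain ⟨k, hk⟩ := Nat.ne_zero_and_sub_one_eq_zero_iff_isPowerOfTwo.mp ⟨h, h2⟩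
  subst hk; rw [Nat.log2_two_pow]

def Fval (ini : Nat → Int) (n s v : Nat) : Int :=
  if s.testBit v then
    (if s = 2 ^ v then ini v else PySem.Int.mod (gval ini n (s ^^^ 2 ^ v)) MODi)
  else 0

lemma log2_lt_of_lt_two_pow {s n : Nat} (h0 : s ≠ 0) (h : s < 2 ^ n) : s.log2 < n := by
  by_contra hc
  have : 2 ^ n ≤ 2 ^ s.log2 := Nat.pow_le_pow_right (by norm_num) (by omega)
  have := Nat.log2_self_le h0
  omega

lemma sum_Fval_eq_gval {ini : Nat → Int} {n s : Nat} (hs : s ≠ 0) (hsn : s < 2 ^ n) :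
    bitSum s (fun v => Fval ini n s v) n = gval ini n s := by
  rw [gval_eq hs]
  by_cases hp : s &&& (s - 1) = 0
  · -- singleton: s = 2^log2 s, and only bit log2 s contributes its raw init value
    simp only [hp, if_pos]
    have hlog : s = 2 ^ s.log2 := eq_two_pow_log2 hs hp
    have hj : s.log2 < n := log2_lt_of_lt_two_pow hs hsn
    conv_lhs => rw [hlog]
    rw [bitSum_two_pow']
    simp only [hj, if_pos]
    simp only [Fval]
    conv_lhs => rw [hlog]
    simp
  · simp only [hp, if_false]
    apply bitSum_congr
    intro u _ hb
    have hne : s ≠ 2 ^ u := by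
      rintro rfl; exact hp (two_pow_and_self_sub_one u)
    simp [Fval, hb, hne]

def mkT (n : Nat) (f : Nat → Nat → Int) : List (List Int) :=
  (List.range (2 ^ n)).map (fun s => mkR n (f s))

lemma mkT_getD {n s : Nat} (f : Nat → Nat → Int) (hs : s < 2 ^ n) :
    (mkT n f).getD s [] = mkR n (f s) := by
  simp [mkT, List.getD_eq_getElem?_getD, hs]

lemma get2_mkT {n s v : Nat} (f : Nat → Nat → Int) (hs : s < 2 ^ n) (hv : v < n) :
    get2 (mkT n f) s v = f s v := by
  rw [get2, mkT_getD f hs, mkR_getD _ hv]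

lemma set2_mkT {n s v : Nat} (f : Nat → Nat → Int) (x : Int) (hs : s < 2 ^ n) (_hv : v < n) :
    set2 (mkT n f) s v x = mkT n (fun a b => if a = s ∧ b = v then x else f a b) := by
  rw [set2, mkT_getD f hs, mkR_set]
  apply List.ext_getElem
  · simp [mkT]
  · intro i h1 h2
    simp only [mkT, List.getElem_set, List.getElem_map, List.getElem_range]
    split
    · rename_i he; subst he
      apply mkR_congr; intro j hj; simp
    · rename_i hne
      apply mkR_congr; intro j hj
      simp [Ne.symm hne]

lemma mkT_congr {n : Nat} {f g : Nat → Nat → Int}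
    (h : ∀ s, s < 2 ^ n → ∀ v, v < n → f s v = g s v) : mkT n f = mkT n g := by
  apply List.map_congr_left; intro s hsm
  exact mkR_congr (fun v hv => h s (List.mem_range.mp hsm) v hv)

lemma aZero_eq_mkT (n : Nat) : aZero n = mkT n (fun _ _ => 0) := rfl

def iniF (S : Int) (P : List Int) (v : Nat) : Int :=
  if (PySem.List.pyGet? P (v : Int)).getD 0 ≠ 0 then (PySem.List.pyGet? P S).getD 0
  else if (v : Int) = S then 1 else 0

def phase1 (S : Int) (P : List Int) (k s v : Nat) : Int :=
  if s = 2 ^ v ∧ v < k then iniF S P v else 0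

lemma pow_lt_pow_n {k n : Nat} (h : k < n) : 2 ^ k < 2 ^ n := Nat.pow_lt_pow_right (by norm_num) h

lemma phase1_succ {S : Int} {P : List Int} {k a b : Nat} (h : ¬(a = 2 ^ k ∧ b = k)) :
    phase1 S P (k + 1) a b = phase1 S P k a b := by
  unfold phase1
  by_cases h1 : a = 2 ^ b
  · by_cases h2 : b = k
    · exact absurd ⟨by rw [h1, h2], h2⟩ h
    · have : (b < k + 1) = (b < k) := by simp; omega
      simp only [h1, true_and, this]
  · simp [h1]

lemma phase1_self {S : Int} {P : List Int} {k : Nat} :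
    phase1 S P (k + 1) (2 ^ k) k = iniF S P k := by
  simp [phase1]

lemma aInit_eq (S : Int) (P : List Int) (n : Nat) :
    (List.range n).foldl (aInitStep S P) (aZero n) = mkT n (phase1 S P n) := by
  suffices h : ∀ k, k ≤ n → (List.range k).foldl (aInitStep S P) (aZero n) = mkT n (phase1 S P k) from
    h n (le_refl n)
  intro k
  induction k with
  | zero =>
    intro _
    rw [List.range_zero, List.foldl_nil, aZero_eq_mkT]
    apply mkT_congr; intro s _ v _; simp [phase1]
  | succ k ih =>
    intro hk
    rw [List.range_succ, List.foldl_append, List.foldl_cons, List.foldl_nil, ih (by omega)]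
    have hkn : k < n := hk
    have h2k : 2 ^ k < 2 ^ n := pow_lt_pow_n hkn
    show aInitStep S P (mkT n (phase1 S P k)) k = mkT n (phase1 S P (k + 1))
    unfold aInitStep
    by_cases hP : (PySem.List.pyGet? P (k : Int)).getD 0 ≠ 0
    · by_cases hS : (k : Int) = S
      · rw [if_pos hS, if_pos hP, set2_mkT _ _ h2k hkn, set2_mkT _ _ h2k hkn]
        apply mkT_congr; intro a _ b _
        by_cases hab : a = 2 ^ k ∧ b = k
        · obtain ⟨rfl, rfl⟩ := hab
          rw [if_pos ⟨rfl, rfl⟩, phase1_self, iniF, if_pos hP]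
        · rw [if_neg hab, if_neg hab, phase1_succ hab]
      · rw [if_neg hS, if_pos hP, set2_mkT _ _ h2k hkn]
        apply mkT_congr; intro a _ b _
        by_cases hab : a = 2 ^ k ∧ b = k
        · obtain ⟨rfl, rfl⟩ := hab
          rw [if_pos ⟨rfl, rfl⟩, phase1_self, iniF, if_pos hP]
        · rw [if_neg hab, phase1_succ hab]
    · by_cases hS : (k : Int) = S
      · rw [if_pos hS, if_neg hP, set2_mkT _ _ h2k hkn]
        apply mkT_congr; intro a _ b _
        by_cases hab : a = 2 ^ k ∧ b = k
        · obtain ⟨rfl, rfl⟩ := hab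
          rw [if_pos ⟨rfl, rfl⟩, phase1_self, iniF, if_neg hP, if_pos hS]
        · rw [if_neg hab, phase1_succ hab]
      · rw [if_neg hS, if_neg hP]
        apply mkT_congr; intro a _ b _
        by_cases hab : a = 2 ^ k ∧ b = k
        · obtain ⟨rfl, rfl⟩ := hab
          rw [phase1_self, iniF, if_neg hP, if_neg hS, phase1]
          simp
        · exact (phase1_succ hab).symm

def phase1R (S : Int) (P : List Int) (k v : Nat) : Int := if v < k then iniF S P v else 0

lemma phase1R_succ {S : Int} {P : List Int} {k b : Nat} (h : ¬ b = k) :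
    phase1R S P (k + 1) b = phase1R S P k b := by
  unfold phase1R
  have : (b < k + 1) = (b < k) := by simp; omega
  simp only [this]

lemma bInit_eq (S : Int) (P : List Int) (n : Nat) : bInit S P n = mkR n (iniF S P) := by
  rw [bInit]
  suffices h : ∀ k, k ≤ n → (List.range k).foldl _ (List.replicate n (0:Int)) = mkR n (phase1R S P k) by
    rw [h n (le_refl n)]
    exact mkR_congr (fun j hj => by simp [phase1R, hj])
  intro k
  induction k with
  | zero =>
    intro _
    rw [List.range_zero, List.foldl_nil, replicate_eq_mkR]
    exact mkR_congr (fun j _ => by simp [phase1R])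
  | succ k ih =>
    intro hk
    rw [List.range_succ, List.foldl_append, List.foldl_cons, List.foldl_nil, ih (by omega)]
    have hkn : k < n := hk
    show (let a1 := if (k : Int) = S then (mkR n (phase1R S P k)).set k 1 else mkR n (phase1R S P k);
      if (PySem.List.pyGet? P (k : Int)).getD 0 ≠ 0 then
        a1.set k ((PySem.List.pyGet? P S).getD 0) else a1) = mkR n (phase1R S P (k + 1))
    by_cases hP : (PySem.List.pyGet? P (k : Int)).getD 0 ≠ 0
    · by_cases hS : (k : Int) = S
      · simp only [if_pos hS, if_pos hP, mkR_set]
        apply mkR_congr; intro b _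
        by_cases hb : b = k
        · subst hb; rw [if_pos rfl, phase1R, if_pos (by omega), iniF, if_pos hP]
        · rw [if_neg hb, if_neg hb, phase1R_succ hb]
      · simp only [if_neg hS, if_pos hP, mkR_set]
        apply mkR_congr; intro b _
        by_cases hb : b = k
        · subst hb; rw [if_pos rfl, phase1R, if_pos (by omega), iniF, if_pos hP]
        · rw [if_neg hb, phase1R_succ hb]
    · by_cases hS : (k : Int) = S
      · simp only [if_pos hS, if_neg hP, mkR_set]
        apply mkR_congr; intro b _
        by_cases hb : b = k
        · subst hb; rw [if_pos rfl, phase1R, if_pos (by omega), iniF, if_neg hP, if_pos hS]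
        · rw [if_neg hb, phase1R_succ hb]
      · simp only [if_neg hS, if_neg hP]
        apply mkR_congr; intro b _
        by_cases hb : b = k
        · rw [hb,
              show phase1R S P k k = 0 from by rw [phase1R, if_neg (by omega)],
              show phase1R S P (k + 1) k = iniF S P k from by rw [phase1R, if_pos (by omega)],
              iniF, if_neg hP, if_neg hS]
        · exact (phase1R_succ hb).symm

lemma shift_and_one (s u : Nat) : (s >>> u) &&& 1 = if s.testBit u then 1 else 0 := by
  rcases h : s.testBit u <;> simp [Nat.testBit, Nat.and_one_is_mod] at h ⊢ <;> omega

lemma and_two_pow_eq_zero {k j : Nat} : k &&& 2 ^ j = 0 ↔ k.testBit j = false := by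
  constructor
  · intro h
    have := congrArg (fun m => m.testBit j) h
    simpa [Nat.testBit_and, Nat.testBit_two_pow] using this
  · intro h
    apply Nat.eq_of_testBit_eq
    intro i
    by_cases hij : i = j
    · subst hij; simp [Nat.testBit_and, h]
    · simp [Nat.testBit_and, Ne.symm hij]

lemma foldl_testBit_add (s : Nat) (f : Nat → Int) (a : Int) :
    ∀ m, (List.range m).foldl (fun t u => if s.testBit u then t + f u else t) a = a + bitSum s f m := by
  intro m
  induction m with
  | zero => rw [List.range_zero, List.foldl_nil, bitSum, add_zero]
  | succ m ih =>
    rw [List.range_succ, List.foldl_append, List.foldl_cons, List.foldl_nil, ih]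
    rcases h : s.testBit m with _ | _ <;> (simp [bitSum, h]; try ring)

lemma sum_range_list (f : Nat → Int) (m : Nat) :
    ((List.range m).map f).sum = ∑ i ∈ Finset.range m, f i := by
  induction m with
  | zero => simp
  | succ m ih => rw [List.range_succ, Finset.sum_range_succ, List.map_append, List.sum_append, ih]; simp

lemma bG_eq (S : Int) (P : List Int) (n : Nat) :
    bG n (mkR n (iniF S P)) =
      mkR (2 ^ n) (fun s => if 1 ≤ s then gval (iniF S P) n s else 0) := by
  rw [bG]
  suffices h : ∀ k, k ≤ 2 ^ n - 1 →
      (List.range k).foldl _ (List.replicate (2 ^ n) (0 : Int)) =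
        mkR (2 ^ n) (fun s => if 1 ≤ s ∧ s ≤ k then gval (iniF S P) n s else 0) by
    rw [h (2 ^ n - 1) (le_refl _)]
    apply mkR_congr; intro s hs
    have : (1 ≤ s ∧ s ≤ 2 ^ n - 1) = (1 ≤ s) := by simp; omega
    simp only [this]
  intro k
  induction k with
  | zero =>
    intro _
    rw [List.range_zero, List.foldl_nil, replicate_eq_mkR]
    apply mkR_congr; intro s _
    have : ¬(1 ≤ s ∧ s ≤ 0) := by omega
    rw [if_neg this]
  | succ k ih =>
    intro hk
    rw [List.range_succ, List.foldl_append, List.foldl_cons, List.foldl_nil, ih (by omega)]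
    have hlt : k + 1 < 2 ^ n := by
      have : (1:Nat) ≤ 2 ^ n := Nat.one_le_two_pow
      omega
    set G := fun s => if 1 ≤ s ∧ s ≤ k then gval (iniF S P) n s else 0 with hG
    dsimp only
    have hGg : ∀ t, 1 ≤ t → t ≤ k → G t = gval (iniF S P) n t := by
      intro t h1 h2; simp only [hG]; rw [if_pos ⟨h1, h2⟩]
    by_cases hsing : (k + 1) &&& k = 0
    · rw [if_pos (by simpa using hsing)]
      have hlogn : (k + 1).log2 < n := log2_lt_of_lt_two_pow (by omega) hlt
      rw [mkR_getD _ hlogn, mkR_set]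
      apply mkR_congr; intro t ht
      by_cases htk : t = k + 1
      · subst htk
        rw [if_pos rfl, if_pos ⟨by omega, by omega⟩, gval_eq (by omega),
          if_pos (by simpa using hsing)]
      · rw [if_neg htk]
        simp only [hG]
        have : (1 ≤ t ∧ t ≤ k + 1) = (1 ≤ t ∧ t ≤ k) := by simp; omega
        simp only [this]
    · rw [if_neg (by simpa using hsing)]
      have hfun : (fun (tot : Int) (u : Nat) =>
          if (k + 1) >>> u &&& 1 = 1 then
            tot + PySem.Int.mod ((mkR (2 ^ n) G).getD ((k + 1) ^^^ 2 ^ u) 0) MODi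
          else tot)
          = (fun tot u => if (k + 1).testBit u then
              tot + PySem.Int.mod ((mkR (2 ^ n) G).getD ((k + 1) ^^^ 2 ^ u) 0) MODi
            else tot) := by
        funext t u
        rw [shift_and_one]
        rcases h : (k + 1).testBit u with _ | _ <;> simp
      rw [hfun, foldl_testBit_add, zero_add]
      have hsum : bitSum (k + 1)
            (fun u => PySem.Int.mod ((mkR (2 ^ n) G).getD ((k + 1) ^^^ 2 ^ u) 0) MODi) n
          = bitSum (k + 1)
            (fun u => PySem.Int.mod (gval (iniF S P) n ((k + 1) ^^^ 2 ^ u)) MODi) n := by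
        apply bitSum_congr
        intro u _ hb
        have hx : (k + 1) ^^^ 2 ^ u < k + 1 := xor_two_pow_lt hb
        have hne : (k + 1) ≠ 2 ^ u := by
          intro he
          apply hsing
          have hk2 : k = 2 ^ u - 1 := by omega
          rw [he, hk2]; exact two_pow_and_self_sub_one u
        have hx0 : (k + 1) ^^^ 2 ^ u ≠ 0 := Nat.xor_ne_zero_iff.mpr hne
        rw [mkR_getD _ (by omega), hGg _ (by omega) (by omega)]
      rw [hsum, mkR_set]
      apply mkR_congr; intro t ht
      by_cases htk : t = k + 1
      · subst htk
        rw [if_pos rfl, if_pos ⟨by omega, by omega⟩, gval_eq (by omega),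
          if_neg (by simpa using hsing)]
      · rw [if_neg htk]
        simp only [hG]
        have : (1 ≤ t ∧ t ≤ k + 1) = (1 ≤ t ∧ t ≤ k) := by simp; omega
        simp only [this]

def phase2 (S : Int) (P : List Int) (n k s v : Nat) : Int :=
  if s.testBit v ∧ s ≠ 2 ^ v ∧ s ^^^ 2 ^ v < k then Fval (iniF S P) n s v
  else phase1 S P n s v

def valJ (S : Int) (P : List Int) (n k j : Nat) : Int :=
  PySem.Int.mod (bitSum k (fun u => Fval (iniF S P) n k u) j) MODi

def midT (S : Int) (P : List Int) (n k j s v : Nat) : Int :=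
  if k.testBit v = false ∧ s = k ||| 2 ^ v then valJ S P n k j else phase2 S P n k s v

def inT (S : Int) (P : List Int) (n k j m s v : Nat) : Int :=
  if k.testBit v = false ∧ s = k ||| 2 ^ v ∧ v < m then valJ S P n k (j + 1)
  else midT S P n k j s v

lemma xor_two_pow_eq_lor {s v : Nat} (h : s.testBit v = false) : s ^^^ 2 ^ v = s ||| 2 ^ v := by
  apply Nat.eq_of_testBit_eq; intro j
  by_cases hj : v = j
  · subst hj; simp [Nat.testBit_xor, h]
  · simp [Nat.testBit_xor, hj]

lemma lor_xor_cancel {k v : Nat} (h : k.testBit v = false) : (k ||| 2 ^ v) ^^^ 2 ^ v = k := by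
  rw [← xor_two_pow_eq_lor h, Nat.xor_xor_cancel_right]

lemma tb_lor (k v : Nat) : (k ||| 2 ^ v).testBit v = true := by
  simp

lemma lor_ne_two_pow {k v : Nat} (hk : k ≠ 0) (h : k.testBit v = false) :
    k ||| 2 ^ v ≠ 2 ^ v := by
  intro he
  apply hk
  apply Nat.zero_of_testBit_eq_false
  intro j
  by_cases hj : j = v
  · subst hj; exact h
  · have := congrArg (fun m => m.testBit j) he
    simp only [Nat.testBit_lor, Nat.testBit_two_pow] at this
    simpa [Ne.symm hj] using this

lemma pymod_pymod_add (a b : Int) :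
    PySem.Int.mod (PySem.Int.mod a MODi + b) MODi = PySem.Int.mod (a + b) MODi := by
  simp [PySem.Int.mod, MODi]

lemma pymod_zero : PySem.Int.mod 0 MODi = 0 := by decide

lemma phase2_at_lor {S : Int} {P : List Int} {n k v : Nat} (hk : k ≠ 0)
    (hbv : k.testBit v = false) : phase2 S P n k (k ||| 2 ^ v) v = 0 := by
  rw [phase2, if_neg, phase1, if_neg]
  · rintro ⟨h1, -⟩; exact lor_ne_two_pow hk hbv h1
  · rintro ⟨-, h2, h3⟩
    rw [lor_xor_cancel hbv] at h3
    omega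

lemma phase2_mid {S : Int} {P : List Int} {n k j : Nat} (hj : j < n)
    (hbj : k.testBit j = true) : phase2 S P n k k j = Fval (iniF S P) n k j := by
  by_cases hkj : k = 2 ^ j
  · rw [phase2, if_neg (by rintro ⟨-, h, -⟩; exact h hkj), phase1, if_pos ⟨hkj, hj⟩,
      Fval, if_pos hbj, if_pos hkj]
  · rw [phase2, if_pos ⟨hbj, hkj, xor_two_pow_lt hbj⟩]

lemma vInner (S : Int) (P : List Int) (n k j : Nat) (hk : k < 2 ^ n) (hj : j < n)
    (hbj : k.testBit j = true) :
    ∀ m, m ≤ n →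
      (List.range m).foldl (fun d v => aMainInner d k j v) (mkT n (midT S P n k j)) =
        mkT n (inT S P n k j m) := by
  intro m
  induction m with
  | zero =>
    intro _
    rw [List.range_zero, List.foldl_nil]
    apply mkT_congr; intro s _ v _
    rw [inT, if_neg (by rintro ⟨-, -, h⟩; omega)]
  | succ m ih =>
    intro hm
    rw [List.range_succ, List.foldl_append, List.foldl_cons, List.foldl_nil, ih (by omega)]
    have hmn : m < n := hm
    rw [aMainInner]
    rcases hbm : k.testBit m with _ | _
    · -- testBit k m = false: the cell (k ||| 2^m, m) is updated
      rw [if_neg (by rw [Ne, and_two_pow_eq_zero]; simp [hbm])]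
      have hor : k ||| 2 ^ m < 2 ^ n :=
        Nat.or_lt_two_pow hk (Nat.pow_lt_pow_right (by norm_num) hmn)
      have hread1 : get2 (mkT n (inT S P n k j m)) (k ||| 2 ^ m) m = valJ S P n k j := by
        rw [get2_mkT _ hor hmn, inT, if_neg (by rintro ⟨-, -, h⟩; omega), midT,
          if_pos ⟨hbm, rfl⟩]
      have hread2 : get2 (mkT n (inT S P n k j m)) k j = Fval (iniF S P) n k j := by
        rw [get2_mkT _ hk hj, inT, if_neg (by rintro ⟨h1, -, -⟩; rw [hbj] at h1; cases h1),
          midT, if_neg (by rintro ⟨h1, -⟩; rw [hbj] at h1; cases h1), phase2_mid hj hbj]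
      rw [hread1, hread2, set2_mkT _ _ hor hmn]
      apply mkT_congr; intro s hs v hv
      by_cases hc : s = k ||| 2 ^ m ∧ v = m
      · obtain ⟨rfl, rfl⟩ := hc
        rw [if_pos ⟨rfl, rfl⟩, inT, if_pos ⟨hbm, rfl, by omega⟩, valJ, valJ,
          pymod_pymod_add]
        have : bitSum k (fun u => Fval (iniF S P) n k u) (j + 1)
            = bitSum k (fun u => Fval (iniF S P) n k u) j + Fval (iniF S P) n k j := by
          rw [bitSum, if_pos hbj]
        rw [this]
      · rw [if_neg hc, inT, inT]
        by_cases hc2 : k.testBit v = false ∧ s = k ||| 2 ^ v ∧ v < m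
        · obtain ⟨h1, h2, h3⟩ := hc2
          rw [if_pos ⟨h1, h2, h3⟩, if_pos ⟨h1, h2, by omega⟩]
        · rw [if_neg hc2, if_neg (by
            rintro ⟨h1, h2, h3⟩
            rcases Nat.lt_succ_iff_lt_or_eq.mp h3 with h | h
            · exact hc2 ⟨h1, h2, h⟩
            · subst h; exact hc ⟨h2, rfl⟩)]
    · -- testBit k m = true: skipped
      rw [if_pos (by rw [Ne, and_two_pow_eq_zero]; simp [hbm])]
      apply mkT_congr; intro s _ v _
      rw [inT, inT]
      by_cases hc : k.testBit v = false ∧ s = k ||| 2 ^ v ∧ v < m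
      · obtain ⟨h1, h2, h3⟩ := hc
        rw [if_pos ⟨h1, h2, h3⟩, if_pos ⟨h1, h2, by omega⟩]
      · rw [if_neg hc, if_neg (by
          rintro ⟨h1, h2, h3⟩
          rcases Nat.lt_succ_iff_lt_or_eq.mp h3 with h | h
          · exact hc ⟨h1, h2, h⟩
          · subst h; rw [hbm] at h1; cases h1)]

lemma uLoop (S : Int) (P : List Int) (n k : Nat) (hk : k < 2 ^ n) (hk0 : k ≠ 0) :
    ∀ j, j ≤ n →
      (List.range j).foldl (fun d u => aMainU n d k u) (mkT n (phase2 S P n k)) =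
        mkT n (midT S P n k j) := by
  intro j
  induction j with
  | zero =>
    intro _
    rw [List.range_zero, List.foldl_nil]
    apply mkT_congr; intro s _ v _
    rw [midT]
    by_cases hc : k.testBit v = false ∧ s = k ||| 2 ^ v
    · obtain ⟨h1, rfl⟩ := hc
      rw [if_pos ⟨h1, rfl⟩, phase2_at_lor hk0 h1, valJ]
      show (0:Int) = _
      rw [show bitSum k (fun u => Fval (iniF S P) n k u) 0 = 0 from rfl, pymod_zero]
    · rw [if_neg hc]
  | succ j ih =>
    intro hj
    rw [List.range_succ, List.foldl_append, List.foldl_cons, List.foldl_nil, ih (by omega)]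
    have hjn : j < n := hj
    rw [aMainU]
    rcases hbj : k.testBit j with _ | _
    · -- bit j not in k: skipped, and valJ is unchanged
      rw [if_pos (and_two_pow_eq_zero.mpr hbj)]
      apply mkT_congr; intro s _ v _
      rw [midT, midT]
      have hval : valJ S P n k (j + 1) = valJ S P n k j := by
        rw [valJ, valJ, bitSum, if_neg (by rw [hbj]; simp), add_zero]
      by_cases hc : k.testBit v = false ∧ s = k ||| 2 ^ v
      · rw [if_pos hc, if_pos hc, hval]
      · rw [if_neg hc, if_neg hc]
    · rw [if_neg (by rw [and_two_pow_eq_zero, hbj]; simp)]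
      rw [vInner S P n k j hk hjn hbj n (le_refl n)]
      apply mkT_congr; intro s _ v hv
      rw [inT]
      by_cases hc : k.testBit v = false ∧ s = k ||| 2 ^ v
      · rw [if_pos ⟨hc.1, hc.2, hv⟩, midT, if_pos hc]
      · rw [if_neg (by rintro ⟨h1, h2, -⟩; exact hc ⟨h1, h2⟩), midT, if_neg hc, midT,
          if_neg hc]

lemma stepK (S : Int) (P : List Int) (n k : Nat) (hk : k < 2 ^ n) :
    (List.range n).foldl (fun d u => aMainU n d k u) (mkT n (phase2 S P n k)) =
      mkT n (phase2 S P n (k + 1)) := by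
  by_cases hk0 : k = 0
  · subst hk0
    have : ∀ d : List (List Int), (List.range n).foldl (fun d u => aMainU n d 0 u) d = d := by
      intro d
      rw [PySem.List.foldl_congr_mem' (List.range n) _ (fun d _ => d) d
        (fun x _ acc => by rw [aMainU, if_pos (Nat.zero_and _)]), PySem.List.foldl_ignore]
    rw [this]
    apply mkT_congr; intro s _ v _
    rw [phase2, phase2]
    by_cases hc : s.testBit v = true ∧ s ≠ 2 ^ v ∧ s ^^^ 2 ^ v < 1
    · exfalso
      obtain ⟨h1, h2, h3⟩ := hc
      have : s ^^^ 2 ^ v = 0 := by omega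
      exact h2 (Nat.xor_eq_zero_iff.mp this)
    · rw [if_neg hc, if_neg (by rintro ⟨h1, h2, h3⟩; exact hc ⟨h1, h2, by omega⟩)]
  · rw [uLoop S P n k hk hk0 n (le_refl n)]
    apply mkT_congr; intro s hs v hv
    rw [midT]
    by_cases hc : k.testBit v = false ∧ s = k ||| 2 ^ v
    · obtain ⟨h1, rfl⟩ := hc
      rw [if_pos ⟨h1, rfl⟩, valJ, sum_Fval_eq_gval hk0 hk, phase2,
        if_pos ⟨tb_lor k v, lor_ne_two_pow hk0 h1, by rw [lor_xor_cancel h1]; omega⟩,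
        Fval, if_pos (tb_lor k v), if_neg (lor_ne_two_pow hk0 h1), lor_xor_cancel h1]
    · rw [if_neg hc, phase2, phase2]
      by_cases hc2 : s.testBit v = true ∧ s ≠ 2 ^ v ∧ s ^^^ 2 ^ v < k
      · rw [if_pos hc2, if_pos ⟨hc2.1, hc2.2.1, by omega⟩]
      · rw [if_neg hc2, if_neg (by
          rintro ⟨h1, h2, h3⟩
          rcases Nat.lt_succ_iff_lt_or_eq.mp h3 with h | h
          · exact hc2 ⟨h1, h2, h⟩
          · apply hc
            have hbv : k.testBit v = false := by
              have := congrArg (fun m => m.testBit v) h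
              simpa [Nat.testBit_xor, h1] using this
            constructor
            · exact hbv
            · rw [← xor_two_pow_eq_lor hbv, ← h, Nat.xor_xor_cancel_right])]

lemma aMain_eq (S : Int) (P : List Int) (n : Nat) :
    aMain n (mkT n (phase1 S P n)) = mkT n (phase2 S P n (2 ^ n)) := by
  rw [aMain]
  have base : mkT n (phase1 S P n) = mkT n (phase2 S P n 0) := by
    apply mkT_congr; intro s _ v _
    rw [phase2, if_neg (by rintro ⟨-, -, h⟩; omega)]
  rw [base]
  suffices h : ∀ K, K ≤ 2 ^ n →
      (List.range K).foldl (fun d s => (List.range n).foldl (fun d u => aMainU n d s u) d)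
        (mkT n (phase2 S P n 0)) = mkT n (phase2 S P n K) from h (2 ^ n) (le_refl _)
  intro K
  induction K with
  | zero => intro _; rw [List.range_zero, List.foldl_nil]
  | succ K ih =>
    intro hK
    rw [List.range_succ, List.foldl_append, List.foldl_cons, List.foldl_nil, ih (by omega)]
    exact stepK S P n K (by omega)

lemma phase2_final {S : Int} {P : List Int} {n s v : Nat} (hs : s < 2 ^ n) (hv : v < n) :
    phase2 S P n (2 ^ n) s v = Fval (iniF S P) n s v := by
  rw [phase2]
  by_cases hc : s.testBit v = true ∧ s ≠ 2 ^ v ∧ s ^^^ 2 ^ v < 2 ^ n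
  · rw [if_pos hc]
  · rw [if_neg hc, phase1, Fval]
    rcases hb : s.testBit v with _ | _
    · rw [if_neg (by rintro ⟨h1, -⟩; subst h1; simp at hb)]
      simp
    · have hxor : s ^^^ 2 ^ v < 2 ^ n := Nat.xor_lt_two_pow hs (pow_lt_pow_n hv)
      have hs2v : s = 2 ^ v := by
        by_contra hne
        exact hc ⟨hb, hne, hxor⟩
      rw [if_pos ⟨hs2v, hv⟩, if_pos hs2v]
      simp

lemma aRes_eq (S : Int) (P : List Int) (n : Nat) :
    aRes n (mkT n (phase2 S P n (2 ^ n))) =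
      (List.range n).map (fun v => ∑ s ∈ Finset.range (2 ^ n), Fval (iniF S P) n s v) := by
  rw [aRes, PySem.List.foldl_append_singleton_eq_map, List.nil_append]
  apply List.map_congr_left
  intro v hv
  have hvn := List.mem_range.mp hv
  rw [PySem.List.foldl_add (List.range (2 ^ n))
    (fun s => get2 (mkT n (phase2 S P n (2 ^ n))) s v) 0, zero_add]
  rw [List.map_congr_left (fun s hsm => by
    rw [get2_mkT _ (List.mem_range.mp hsm) hvn,
      phase2_final (List.mem_range.mp hsm) hvn])]
  exact sum_range_list _ _

lemma bRes_eq (S : Int) (P : List Int) (n : Nat) :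
    bRes n (mkR n (iniF S P)) (mkR (2 ^ n) (fun s => if 1 ≤ s then gval (iniF S P) n s else 0)) =
      (List.range n).map (fun v => iniF S P v +
        ∑ s0 ∈ Finset.range (2 ^ n - 1),
          (if (s0 + 1).testBit v = false then PySem.Int.mod (gval (iniF S P) n (s0 + 1)) MODi
           else 0)) := by
  rw [bRes, PySem.List.foldl_append_singleton_eq_map, List.nil_append]
  apply List.map_congr_left
  intro v hv
  have hvn := List.mem_range.mp hv
  rw [mkR_getD _ hvn]
  rw [PySem.List.foldl_congr_mem (List.range (2 ^ n - 1)) _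
    (fun acc s0 => acc +
      (if (s0 + 1).testBit v = false then
        PySem.Int.mod (gval (iniF S P) n (s0 + 1)) MODi else 0)) _
    (by
      intro acc s0 hs0
      have hlt : s0 + 1 < 2 ^ n := by
        have := List.mem_range.mp hs0
        have h1 : (1:Nat) ≤ 2 ^ n := Nat.one_le_two_pow
        omega
      show (if ((s0 + 1) >>> v) &&& 1 = 0 then
          acc + PySem.Int.mod ((mkR (2 ^ n) (fun s => if 1 ≤ s then gval (iniF S P) n s else 0)).getD (s0 + 1) 0) MODi
        else acc) = _
      rw [shift_and_one, mkR_getD _ hlt, if_pos (show 1 ≤ s0 + 1 by omega)]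
      rcases hb : (s0 + 1).testBit v with _ | _ <;> simp [hb])]
  rw [PySem.List.foldl_add, sum_range_list]

lemma bridge (S : Int) (P : List Int) (n v : Nat) (hv : v < n) :
    ∑ s ∈ Finset.range (2 ^ n), Fval (iniF S P) n s v =
      iniF S P v + ∑ s0 ∈ Finset.range (2 ^ n - 1),
        (if (s0 + 1).testBit v = false then PySem.Int.mod (gval (iniF S P) n (s0 + 1)) MODi
         else 0) := by
  have h2v : 2 ^ v < 2 ^ n := pow_lt_pow_n hv
  -- rewrite the right-hand sum as a sum over Ico 1 (2^n)
  have hIco : ∑ s0 ∈ Finset.range (2 ^ n - 1),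
      (if (s0 + 1).testBit v = false then PySem.Int.mod (gval (iniF S P) n (s0 + 1)) MODi
       else 0) =
      ∑ t ∈ Finset.Ico 1 (2 ^ n),
        (if t.testBit v = false then PySem.Int.mod (gval (iniF S P) n t) MODi else 0) := by
    rw [Finset.sum_Ico_eq_sum_range]
    apply Finset.sum_congr rfl
    intro i _
    rw [Nat.add_comm 1 i]
  rw [hIco]
  -- keep only the terms with bit v set on the left
  rw [← Finset.sum_filter_of_ne (p := fun s => s.testBit v = true) (by
    intro s _ hfs
    by_contra hb
    apply hfs
    rw [Fval, if_neg hb])]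
  -- split off s = 2^v, whose term is iniF v
  have hmem : 2 ^ v ∈ (Finset.range (2 ^ n)).filter (fun s => s.testBit v = true) := by
    simp [Finset.mem_filter, Finset.mem_range, h2v]
  rw [← Finset.add_sum_erase _ _ hmem]
  congr 1
  · rw [Fval, if_pos (by simp), if_pos rfl]
  -- keep only the terms with bit v clear on the right
  conv_rhs => rw [← Finset.sum_filter_of_ne (p := fun t => t.testBit v = false) (by
    intro t _ hft
    by_contra hb
    exact hft (if_neg hb))]
  -- the bijection s ↦ s ^^^ 2^v
  apply Finset.sum_nbij' (i := fun s => s ^^^ 2 ^ v) (j := fun t => t ^^^ 2 ^ v)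
  · intro a ha
    obtain ⟨hne, hmem2⟩ := Finset.mem_erase.mp ha
    obtain ⟨hrange, hbit⟩ := Finset.mem_filter.mp hmem2
    have hlt : a ^^^ 2 ^ v < 2 ^ n := Nat.xor_lt_two_pow (Finset.mem_range.mp hrange) h2v
    have hnz : a ^^^ 2 ^ v ≠ 0 := Nat.xor_ne_zero_iff.mpr hne
    refine Finset.mem_filter.mpr ⟨Finset.mem_Ico.mpr ⟨by omega, hlt⟩, ?_⟩
    simp [Nat.testBit_xor, hbit]
  · intro t ht
    obtain ⟨hico, hbit⟩ := Finset.mem_filter.mp ht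
    obtain ⟨h1, h2⟩ := Finset.mem_Ico.mp hico
    have hlor : t ^^^ 2 ^ v = t ||| 2 ^ v := xor_two_pow_eq_lor hbit
    refine Finset.mem_erase.mpr ⟨?_, Finset.mem_filter.mpr ⟨Finset.mem_range.mpr ?_, ?_⟩⟩
    · rw [hlor]; exact lor_ne_two_pow (by omega) hbit
    · rw [hlor]; exact Nat.or_lt_two_pow h2 h2v
    · rw [hlor, tb_lor]
  · intro a _; rw [Nat.xor_xor_cancel_right]
  · intro t _; rw [Nat.xor_xor_cancel_right]
  · intro a ha
    obtain ⟨hne, hmem2⟩ := Finset.mem_erase.mp ha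
    obtain ⟨-, hbit⟩ := Finset.mem_filter.mp hmem2
    rw [Fval, if_pos hbit, if_neg hne, if_pos (by simp [Nat.testBit_xor, hbit])]

lemma main_eq (N S : Int) (P : List Int) : bitDP N S P = bitDP_alt N S P := by
  show aRes N.toNat (aMain N.toNat ((List.range N.toNat).foldl (aInitStep S P) (aZero N.toNat)))
      = bRes N.toNat (bInit S P N.toNat) (bG N.toNat (bInit S P N.toNat))
  rw [aInit_eq, aMain_eq, aRes_eq, bInit_eq, bG_eq, bRes_eq]
  apply List.map_congr_left
  intro v hv
  exact bridge S P N.toNat v (List.mem_range.mp hv)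

-- ===== VERDICT =====
theorem bitDP_spec : Claim_equal_bitDP := by
  intro N S P _ _
  unfold Spec_bitDP
  exact main_eq N S P
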